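-- pv_equiv track=rewrite | github.com/Brogod97/CodingTest | 프로그래머스/0/181837. 커피 심부름/커피 심부름.py | solution
-- ===== SOURCE A (Python) =====
-- def solution(order):
--     answer = 0
--
--     for o in order:
--         if o.find("cafelatte") == -1:
--             answer += 4500
--         else:
--             answer += 5000
--
--     return answer
-- ===== SOURCE B (Python) =====
-- PRICE = {False: 4500, True: 5000}
--
-- def solution(order):
--     n = len(order)
--     if n == 0:
--         return 0
--     if n == 1:
--         return PRICE["cafelatte" in order[0]]
--     mid = n // 2
--     return solution(order[:mid]) + solution(order[mid:])
-- ===== Notes on version B (the rewrite author's own statement) =====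
-- stated objective: alternative
-- what changed: Replaces the iterative if/else accumulator with a divide-and-conquer recursion: split the order list in halves, price a single order through a boolean-keyed price table at the leaves, and add the two sub-totals.
import Mathlib
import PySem

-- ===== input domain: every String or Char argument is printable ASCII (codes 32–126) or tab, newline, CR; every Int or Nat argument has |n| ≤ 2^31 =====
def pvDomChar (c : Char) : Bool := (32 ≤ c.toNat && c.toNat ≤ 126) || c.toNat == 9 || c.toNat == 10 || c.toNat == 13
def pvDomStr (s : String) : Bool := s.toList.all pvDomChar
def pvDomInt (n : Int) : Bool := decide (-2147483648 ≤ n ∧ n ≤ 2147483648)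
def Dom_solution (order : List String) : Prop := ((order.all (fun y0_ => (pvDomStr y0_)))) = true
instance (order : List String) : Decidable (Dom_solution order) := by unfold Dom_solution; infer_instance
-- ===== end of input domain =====

-- B replaces the iterative if/else accumulator with divide-and-conquer: halve the list, price a single order via a boolean-keyed table at the leaves, add the sub-totals; alternative decomposition, same cost.
-- ===== PORT A =====
def solution (order : List String) : Int :=
  order.foldl (fun answer o =>
    if PySem.Str.find o "cafelatte" = -1 then answer + 4500 else answer + 5000) 0

-- ===== PORT B =====
-- PRICE = {False: 4500, True: 5000}
def PRICE : PySem.Dict Bool Int := PySem.Dict.ofList [(false, 4500), (true, 5000)]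

-- Python's order[0] and PRICE[k] cannot fail here (n == 1 and both keys present), so the
-- .getD defaults below are never taken.
def solution_alt (order : List String) : Int :=
  let n : Int := (order.length : Int)
  if n = 0 then 0
  else if n = 1 then
    (PySem.Dict.get? PRICE (PySem.Str.isIn "cafelatte" ((PySem.List.pyGet? order 0).getD ""))).getD 0
  else
    let mid : Int := PySem.Int.floordiv n 2
    solution_alt (PySem.List.slice order none (some mid)) +
      solution_alt (PySem.List.slice order (some mid) none)
termination_by order.length
decreasing_by
  · have h2 : 2 ≤ order.length := by omega
    have hm : PySem.Int.floordiv (order.length : Int) 2 = ((order.length / 2 : Nat) : Int) := by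
      rw [PySem.Int.floordiv, Int.fdiv_eq_ediv_of_nonneg _ (by omega), Int.natCast_div]; norm_num
    simp only [hm, PySem.List.slice_to_natCast, List.length_take]
    omega
  · have h2 : 2 ≤ order.length := by omega
    have hm : PySem.Int.floordiv (order.length : Int) 2 = ((order.length / 2 : Nat) : Int) := by
      rw [PySem.Int.floordiv, Int.fdiv_eq_ediv_of_nonneg _ (by omega), Int.natCast_div]; norm_num
    simp only [hm, PySem.List.slice_from_natCast, List.length_drop]
    omega

-- ===== PRECONDITION & SPEC =====
def Spec_solution (order : List String) (out : Int) : Prop := out = solution_alt order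
instance (order : List String) (out : Int) : Decidable (Spec_solution order out) := by unfold Spec_solution; infer_instance

-- ===== CLAIM (what is proved, stated in full; the proofs are below) =====
def Claim_equal_solution : Prop := ∀ (order : List String), Dom_solution order → Spec_solution order (solution order)

-- ===== LEMMAS AND PROOFS =====
theorem solution_shift (order : List String) (acc : Int) :
    order.foldl (fun answer o =>
      if PySem.Str.find o "cafelatte" = -1 then answer + 4500 else answer + 5000) acc
    = acc + solution order := by
  induction order generalizing acc with
  | nil => simp [solution]
  | cons o rest ih =>
    simp only [solution, List.foldl_cons]
    rw [ih, ih]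
    split_ifs <;> ring

theorem solution_append (xs ys : List String) :
    solution (xs ++ ys) = solution xs + solution ys := by
  simp only [solution, List.foldl_append]
  rw [solution_shift]
  simp [solution]

theorem solution_single (o : String) :
    solution [o] = (PySem.Dict.get? PRICE (PySem.Str.isIn "cafelatte" o)).getD 0 := by
  have key : (PySem.Str.find o "cafelatte" = -1) ↔ PySem.Str.isIn "cafelatte" o = false := by
    rw [PySem.Str.find_eq_neg_one_iff, ← Bool.not_eq_true, PySem.Str.isIn_iff_infix]
  simp only [solution, List.foldl_cons, List.foldl_nil]
  by_cases h : PySem.Str.find o "cafelatte" = -1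
  · rw [if_pos h, key.mp h]
    decide
  · have hin : PySem.Str.isIn "cafelatte" o = true := by
      cases hb : PySem.Str.isIn "cafelatte" o
      · exact absurd (key.mpr hb) h
      · rfl
    rw [if_neg h, hin]
    decide

theorem solution_alt_eq (n : Nat) : ∀ (order : List String), order.length = n →
    solution_alt order = solution order := by
  induction n using Nat.strong_induction_on with
  | _ n ih =>
    intro order hn
    cases order with
    | nil => simp [solution_alt, solution]
    | cons a t =>
      cases t with
      | nil =>
        rw [solution_alt, solution_single]
        simp [PySem.List.pyGet?, PySem.List.pyIdx?]
      | cons b rest =>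
        set L := a :: b :: rest with hL
        have hlen : L.length = rest.length + 2 := by simp [hL]
        have hm : PySem.Int.floordiv (L.length : Int) 2 = ((L.length / 2 : Nat) : Int) := by
          rw [PySem.Int.floordiv, Int.fdiv_eq_ediv_of_nonneg _ (by omega), Int.natCast_div]; norm_num
        rw [solution_alt]
        simp only
        rw [if_neg (by omega), if_neg (by omega), hm,
          PySem.List.slice_to_natCast, PySem.List.slice_from_natCast]
        have hmid_lt : (L.take (L.length / 2)).length < n := by
          have := List.length_take_le (L.length / 2) L
          omega
        have hdrop_lt : (L.drop (L.length / 2)).length < n := by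
          simp only [List.length_drop]
          omega
        rw [ih _ hmid_lt _ rfl, ih _ hdrop_lt _ rfl]
        rw [← solution_append, List.take_append_drop]

-- ===== VERDICT (by name: the statement is the Claim_ definition above) =====
theorem solution_spec : Claim_equal_solution := by
  intro order _
  unfold Spec_solution
  exact (solution_alt_eq order.length order rfl).symm
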